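-- pv_equiv track=rewrite | github.com/andrew-fiel/ruth-scrabble | Board.py | _bitVectorToList
-- ===== SOURCE A (Python) =====
-- def _bitVectorToList(value):
--     offset = 0
--     result = []
--     while value != 0:
--         if(value & 1 != 0):
--             temp = offset + ord('A')
--             result.append(chr(temp))
--         value = value & ~1
--         value = value >> 1
--         offset += 1
--     return result
-- ===== SOURCE B (Python) =====
-- def _bitVectorToList(value):
--     # Build the binary string once, then scan it from the least-significant end.
--     bits = bin(value)[2:]
--     return [chr(i + ord('A')) for i, ch in enumerate(reversed(bits)) if ch == '1']
-- ===== Notes on version B (the rewrite author's own statement) =====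
-- stated objective: idiomatic
-- what changed: B builds the binary string with bin() once and scans its reversed characters with enumerate, instead of A's mask-and-shift while loop over the integer.
import Mathlib
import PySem

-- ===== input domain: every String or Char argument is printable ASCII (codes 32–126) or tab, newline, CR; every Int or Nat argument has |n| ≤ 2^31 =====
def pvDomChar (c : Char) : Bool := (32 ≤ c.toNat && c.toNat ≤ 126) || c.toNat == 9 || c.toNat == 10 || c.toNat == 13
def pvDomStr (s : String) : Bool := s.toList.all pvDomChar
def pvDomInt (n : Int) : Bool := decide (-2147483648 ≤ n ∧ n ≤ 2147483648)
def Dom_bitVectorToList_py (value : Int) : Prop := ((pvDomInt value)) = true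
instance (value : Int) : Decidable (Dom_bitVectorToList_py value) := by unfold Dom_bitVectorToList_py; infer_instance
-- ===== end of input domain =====

-- B replaces A's mask-and-shift while loop with a scan of the reversed bin() string (idiomatic, same cost).

-- ===== PORT A =====
-- A's while loop; fuel = value.toNat + 1 only makes the recursion total (the loop halves a
-- positive value each step, so the fuel is never exhausted on 0 ≤ value; A diverges on value < 0).
def bitVectorToList_py_loop : Nat → Int → Int → List String → List String
  | 0, _, _, result => result
  | fuel + 1, value, offset, result =>
    if value = 0 then result
    else
      let result' := if PySem.Int.band value 1 ≠ 0
        then result ++ [String.mk [Char.ofNat (offset + 65).toNat]]   -- temp = offset + ord('A'); chr(temp)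
        else result
      bitVectorToList_py_loop fuel ((PySem.Int.band value (Int.not 1)) >>> (1 : Nat)) (offset + 1) result'

def bitVectorToList_py (value : Int) : List String :=
  bitVectorToList_py_loop (value.toNat + 1) value 0 []

-- ===== PORT B =====
-- bin(value)[2:] as a char list (PySem.Int.toBinChars0b = bin), then the comprehension over
-- enumerate(reversed(bits)) as filterMap over PySem.List.enumerate of the reversed list.
def bitVectorToList_py_alt (value : Int) : List String :=
  let bits := (PySem.Int.toBinChars0b value).drop 2
  (PySem.List.enumerate bits.reverse).filterMap
    (fun p => if p.2 = '1' then some (String.mk [Char.ofNat (p.1 + 65).toNat]) else none)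

-- ===== PRECONDITION & SPEC =====
-- Pre_ excludes value < 0: there A's while loop never terminates (value >> 1 stays negative).
def Pre_bitVectorToList_py (value : Int) : Prop := 0 ≤ value
instance (value : Int) : Decidable (Pre_bitVectorToList_py value) := by unfold Pre_bitVectorToList_py; infer_instance
def pvWitness_bitVectorToList_py : Int := 21

def Spec_bitVectorToList_py (value : Int) (out : List String) : Prop := out = bitVectorToList_py_alt value
instance (value : Int) (out : List String) : Decidable (Spec_bitVectorToList_py value out) := by unfold Spec_bitVectorToList_py; infer_instance

-- ===== CLAIM (what is proved, stated in full; the proofs are below) =====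
def Claim_equal_bitVectorToList_py : Prop := ∀ (value : Int), Dom_bitVectorToList_py value → Pre_bitVectorToList_py value → Spec_bitVectorToList_py value (bitVectorToList_py value)

-- ===== LEMMAS AND PROOFS =====

-- canonical per-bit result, recursing on the halved value
def pvBits (n : Nat) (k : Int) : List String :=
  if n = 0 then []
  else (if n % 2 = 1 then [String.mk [Char.ofNat (k + 65).toNat]] else []) ++ pvBits (n / 2) (k + 1)
decreasing_by exact Nat.div_lt_self (Nat.pos_of_ne_zero (by assumption)) (by norm_num)

-- msb-first binary digit characters (what Nat.toDigits 2 computes)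
def pvMsb (n : Nat) : List Char :=
  if n < 2 then [Nat.digitChar n]
  else pvMsb (n / 2) ++ [Nat.digitChar (n % 2)]
decreasing_by exact Nat.div_lt_self (by omega) (by norm_num)

theorem pvToDigitsCore_eq (fuel : Nat) : ∀ (n : Nat) (ds : List Char),
    n < fuel → Nat.toDigitsCore 2 fuel n ds = pvMsb n ++ ds := by
  induction fuel with
  | zero => intro n ds h; omega
  | succ fuel ih =>
    intro n ds h
    rw [Nat.toDigitsCore]
    by_cases h2 : n / 2 = 0
    · have hn : n < 2 := by omega
      simp only [h2, if_pos rfl]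
      conv_rhs => rw [pvMsb, if_pos hn]
      rw [Nat.mod_eq_of_lt hn]
      rfl
    · simp only [if_neg h2]
      rw [ih (n / 2) _ (by omega)]
      conv_rhs => rw [pvMsb, if_neg (show ¬ n < 2 by omega)]
      simp

theorem pvToDigits_eq (n : Nat) : Nat.toDigits 2 n = pvMsb n := by
  rw [Nat.toDigits, pvToDigitsCore_eq (n + 1) n [] (by omega)]
  simp

theorem pvMsb_reverse (n : Nat) (h : 2 ≤ n) :
    (pvMsb n).reverse = Nat.digitChar (n % 2) :: (pvMsb (n / 2)).reverse := by
  rw [pvMsb, if_neg (by omega)]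
  simp

-- the B-side comprehension over enumerate, as a function of the reversed char list
def pvLetters (l : List Char) (k : Int) : List String :=
  (PySem.List.enumerate l k).filterMap
    (fun p => if p.2 = '1' then some (String.mk [Char.ofNat (p.1 + 65).toNat]) else none)

theorem pvLetters_cons (c : Char) (l : List Char) (k : Int) :
    pvLetters (c :: l) k
      = (if c = '1' then [String.mk [Char.ofNat (k + 65).toNat]] else []) ++ pvLetters l (k + 1) := by
  unfold pvLetters
  rw [PySem.List.enumerate_cons]
  by_cases hc : c = '1' <;> simp [hc]

theorem pvLetters_msb (n : Nat) (k : Int) : pvLetters ((pvMsb n).reverse) k = pvBits n k := by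
  induction n using Nat.strong_induction_on generalizing k with
  | _ n ih =>
    by_cases h2 : 2 ≤ n
    · rw [pvMsb_reverse n h2, pvLetters_cons, ih (n / 2) (by omega) (k + 1)]
      conv_rhs => rw [pvBits, if_neg (show ¬ n = 0 by omega)]
      rcases (show n % 2 = 0 ∨ n % 2 = 1 by omega) with h | h <;> simp [h, Nat.digitChar]
    · interval_cases n
      · rw [pvMsb]; simp [pvLetters, PySem.List.enumerate_cons, PySem.List.enumerate,
          Nat.digitChar, pvBits]
      · rw [pvMsb]
        simp only [if_pos (by norm_num : 1 < 2)]
        rw [show ([Nat.digitChar 1].reverse) = ['1'] by rfl, pvLetters_cons]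
        simp [pvLetters, PySem.List.enumerate, pvBits]

theorem pvAlt_eq (n : Nat) : bitVectorToList_py_alt (n : Int) = pvBits n 0 := by
  unfold bitVectorToList_py_alt
  have hb : (PySem.Int.toBinChars0b (n : Int)).drop 2 = Nat.toDigits 2 n := by
    have hnn : ¬((n : Int) < 0) := by omega
    simp [PySem.Int.toBinChars0b, hnn]
  rw [hb, pvToDigits_eq]
  exact pvLetters_msb n 0

theorem pvStep_band (n : Nat) :
    (PySem.Int.band (n : Int) (Int.not 1)) >>> (1 : Nat) = ((n / 2 : Nat) : Int) := by
  have h1 : PySem.Int.band (n : Int) (Int.not 1) = ((n - n % 2 : Nat) : Int) := by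
    simp [PySem.Int.band, Int.not]
  rw [h1, ← Int.natCast_shiftRight]
  congr 1
  omega

theorem pvBand_one (n : Nat) : PySem.Int.band (n : Int) 1 = ((n % 2 : Nat) : Int) := by
  simp [PySem.Int.band]

theorem pvLoop_eq (fuel : Nat) : ∀ (n : Nat) (k : Int) (acc : List String),
    n < 2 ^ fuel → bitVectorToList_py_loop fuel (n : Int) k acc = acc ++ pvBits n k := by
  induction fuel with
  | zero =>
    intro n k acc h
    have : n = 0 := by simpa using h
    subst this
    rw [pvBits]; simp [bitVectorToList_py_loop]
  | succ fuel ih =>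
    intro n k acc h
    by_cases h0 : n = 0
    · subst h0; rw [pvBits]; simp [bitVectorToList_py_loop]
    · rw [bitVectorToList_py_loop, if_neg (by exact_mod_cast h0)]
      rw [pvStep_band n]
      have hhalf : n / 2 < 2 ^ fuel := by
        have := Nat.pow_succ 2 fuel
        omega
      rw [ih (n / 2) (k + 1) _ hhalf]
      conv_rhs => rw [pvBits, if_neg h0]
      have hb : (PySem.Int.band (n : Int) 1 ≠ 0) ↔ n % 2 = 1 := by
        rw [pvBand_one]
        omega
      by_cases hm : n % 2 = 1
      · simp only [if_pos (hb.mpr hm), if_pos hm]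
        simp
      · have : ¬ (PySem.Int.band (n : Int) 1 ≠ 0) := by
          intro hc; exact hm (hb.mp hc)
        simp only [if_neg this, if_neg hm]
        simp

-- ===== VERDICT (by name: the statement is the Claim_ definition above) =====
theorem bitVectorToList_py_spec : Claim_equal_bitVectorToList_py := by
  intro value _ hpre
  obtain ⟨n, rfl⟩ := Int.eq_ofNat_of_zero_le hpre
  unfold Spec_bitVectorToList_py bitVectorToList_py
  rw [pvAlt_eq]
  have : ((n : Int)).toNat = n := Int.toNat_natCast n
  rw [this]
  exact (pvLoop_eq (n + 1) n 0 [] (Nat.lt_two_pow_self.trans (Nat.pow_lt_pow_succ (by norm_num)))).trans (by simp)
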